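-- pv_equiv track=rewrite | github.com/Repo-Factory/Learn-Chinese | app/translator/webscraper.py | limit_string
-- ===== SOURCE A (Python) =====
-- def limit_string(string, string_number):
--     commas_index = []
--     for pos, char in enumerate(string):
--         if char == ',':
--             commas_index.append(pos)
--
--     string_produced = False
--     i = string_number
--
--     while string_produced is False and i > 0:
--         try:
--             string = string[0: commas_index[i - 1]]
--             string_produced = True
--         except Exception as exc:
--             i = i - 1
--
--     return string
-- ===== SOURCE B (Python) =====
-- def limit_string(string, string_number):
--     if string_number <= 0:
--         return string
--     count = 0
--     cut = None
--     last = None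
--     for pos, ch in enumerate(string):
--         if ch == ',':
--             count += 1
--             last = pos
--             if count == string_number:
--                 cut = pos
--                 break
--     if cut is not None:
--         return string[:cut]
--     if last is not None:
--         return string[:last]
--     return string
-- ===== Notes on version B (the rewrite author's own statement) =====
-- stated objective: simpler
-- what changed: B replaces A's full comma-position list plus decrementing try/except while-loop with one forward scan that counts commas, remembers the last comma seen, stops at the string_number-th comma, then slices once.
import Mathlib
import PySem

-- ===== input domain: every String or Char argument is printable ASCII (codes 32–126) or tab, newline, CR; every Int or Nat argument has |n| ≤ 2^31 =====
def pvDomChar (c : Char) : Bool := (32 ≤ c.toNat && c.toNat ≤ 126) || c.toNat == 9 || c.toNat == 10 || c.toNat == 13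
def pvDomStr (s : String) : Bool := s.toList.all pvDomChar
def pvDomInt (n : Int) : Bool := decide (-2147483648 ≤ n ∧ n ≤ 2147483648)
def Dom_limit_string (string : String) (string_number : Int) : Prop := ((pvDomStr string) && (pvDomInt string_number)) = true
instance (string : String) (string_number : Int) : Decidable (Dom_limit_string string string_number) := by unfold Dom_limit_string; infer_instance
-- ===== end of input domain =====

-- B replaces A's comma-position list plus decrementing try/except while-loop by a single
-- forward scan (count commas, remember the last one and the string_number-th one); objective: simpler.

-- ===== PORT A =====
-- A's while loop: retries string[0:commas_index[i-1]] with decreasing i until the index is in range.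
def pvALoop (s : List Char) (commas : List Int) (i : Int) : List Char :=
  if _h : 0 < i then
    match PySem.List.pyGet? commas (i - 1) with
    | some idx => PySem.List.slice s (some 0) (some idx)   -- string[0:commas_index[i-1]], success
    | none => pvALoop s commas (i - 1)                     -- IndexError: i = i - 1
  else s
termination_by i.toNat
decreasing_by omega

def limit_string (string : String) (string_number : Int) : String :=
  -- commas_index built by the for/enumerate/append loop
  let commas : List Int :=
    (PySem.List.enumerate string.toList).foldl
      (fun acc p => if p.2 = ',' then acc ++ [p.1] else acc) []
  String.ofList (pvALoop string.toList commas string_number)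

-- ===== PORT B =====
-- B's single scan: returns (cut, last) exactly as Source B's loop leaves them.
def pvBLoop (n : Int) (l : List (Int × Char)) (count : Int) (last : Option Int) :
    Option Int × Option Int :=
  match l with
  | [] => (none, last)
  | (pos, ch) :: rest =>
    if ch = ',' then
      if count + 1 = n then (some pos, some pos)   -- break: cut = pos (last was just set to pos)
      else pvBLoop n rest (count + 1) (some pos)
    else pvBLoop n rest count last

def limit_string_alt (string : String) (string_number : Int) : String :=
  if string_number ≤ 0 then string
  else
    match pvBLoop string_number (PySem.List.enumerate string.toList) 0 none with
    | (some c, _) => String.ofList (PySem.List.slice string.toList (some 0) (some c))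
    | (none, some p) => String.ofList (PySem.List.slice string.toList (some 0) (some p))
    | (none, none) => string

-- ===== PRECONDITION & SPEC =====
def Spec_limit_string (string : String) (string_number : Int) (out : String) : Prop := out = limit_string_alt string string_number
instance (string : String) (string_number : Int) (out : String) : Decidable (Spec_limit_string string string_number out) := by unfold Spec_limit_string; infer_instance

-- ===== CLAIM (what is proved, stated in full; the proofs are below) =====
def Claim_equal_limit_string : Prop := ∀ (string : String) (string_number : Int), Dom_limit_string string string_number → Spec_limit_string string string_number (limit_string string string_number)

-- ===== LEMMAS AND PROOFS =====

-- comma positions of an enumerated tail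
def pvQ (l : List (Int × Char)) : List Int := (l.filter (fun p => p.2 = ',')).map (·.1)

theorem pvQ_cons (pos : Int) (ch : Char) (rest : List (Int × Char)) :
    pvQ ((pos, ch) :: rest) = if ch = ',' then pos :: pvQ rest else pvQ rest := by
  by_cases h : ch = ',' <;> simp [pvQ, h]

-- A's while-loop, characterised: cut at the min(i, #commas)-th comma, or no-op without commas
theorem pvALoop_spec (s : List Char) (P : List Int) (i : Int) (hi : 0 < i) :
    pvALoop s P i =
      if P = [] then s
      else PySem.List.slice s (some 0) (some (P.getD (min i.toNat P.length - 1) 0)) := by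
  obtain ⟨n, hn⟩ : ∃ n, i.toNat ≤ n := ⟨i.toNat, le_refl _⟩
  induction n generalizing i with
  | zero => omega
  | succ n ih =>
    rw [pvALoop, dif_pos hi]
    by_cases hle : i ≤ (P.length : Int)
    · have hlt : (i-1).toNat < P.length := by omega
      have hg : PySem.List.pyGet? P (i-1) = P[(i-1).toNat]? := PySem.List.pyGet?_of_nonneg P (by omega)
      rw [hg, List.getElem?_eq_getElem hlt]
      have hPne : P ≠ [] := by
        intro h; subst h; simp at hle; omega
      rw [if_neg hPne]
      have hmin : min i.toNat P.length = i.toNat := Nat.min_eq_left (by omega)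
      rw [hmin, List.getD_eq_getElem _ _ (by omega)]
      have hidx : (i-1).toNat = i.toNat - 1 := by omega
      simp [hidx]
    · have h0 : PySem.List.pyGet? P (i-1) = none := by
        rw [PySem.List.pyGet?_eq_none_iff]
        simp [PySem.Raise.InRange]
        omega
      rw [h0]
      by_cases hi1 : 0 < i - 1
      · rw [ih (i-1) hi1 (by omega)]
        have h2 : min (i-1).toNat P.length = P.length := Nat.min_eq_right (by omega)
        have h3 : min i.toNat P.length = P.length := Nat.min_eq_right (by omega)
        rw [h2, h3]
      · have hP : P = [] := by
          cases P with
          | nil => rfl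
          | cons x xs => simp at hle ⊢; omega
        rw [pvALoop, dif_neg hi1, if_pos hP]

-- B's scan, characterised: the n-th comma if reached, otherwise the last comma (or none)
theorem pvBLoop_spec (n : Int) (l : List (Int × Char)) (count : Int) (last : Option Int)
    (hc : count < n) :
    pvBLoop n l count last =
      if n ≤ count + (pvQ l).length then
        (some ((pvQ l).getD (n - count - 1).toNat 0),
         some ((pvQ l).getD (n - count - 1).toNat 0))
      else
        (none, if pvQ l = [] then last else some ((pvQ l).getLast?.getD 0)) := by
  induction l generalizing count last with
  | nil =>
    simp [pvBLoop, pvQ]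
    omega
  | cons hd tl ih =>
    obtain ⟨pos, ch⟩ := hd
    rw [pvBLoop, pvQ_cons]
    by_cases hch : ch = ','
    · rw [if_pos hch, if_pos hch]
      by_cases heq : count + 1 = n
      · rw [if_pos heq]
        have hle : n ≤ count + ((pos :: pvQ tl).length : Int) := by
          simp only [List.length_cons]; push_cast; omega
        rw [if_pos hle]
        have h0 : (n - count - 1).toNat = 0 := by omega
        rw [h0, List.getD_cons_zero]
      · rw [if_neg heq, ih (count + 1) (some pos) (by omega)]
        by_cases hle : n ≤ count + 1 + ((pvQ tl).length : Int)
        · have hle' : n ≤ count + ((pos :: pvQ tl).length : Int) := by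
            simp only [List.length_cons]; push_cast; omega
          rw [if_pos hle, if_pos hle']
          have h1 : (n - count - 1).toNat = (n - (count + 1) - 1).toNat + 1 := by omega
          rw [h1, List.getD_cons_succ]
        · have hle' : ¬ n ≤ count + ((pos :: pvQ tl).length : Int) := by
            simp only [List.length_cons]; push_cast; omega
          rw [if_neg hle, if_neg hle', if_neg (List.cons_ne_nil pos (pvQ tl))]
          by_cases htl : pvQ tl = []
          · rw [if_pos htl, htl]
            simp
          · rw [if_neg htl]
            obtain ⟨x, xs, hxx⟩ := List.exists_cons_of_ne_nil htl
            rw [hxx, List.getLast?_cons_cons]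
    · rw [if_neg hch, if_neg hch, ih count last (by omega)]

-- A's comma-collecting foldl builds exactly pvQ of the enumerated string
theorem pvCommas_eq (s : String) :
    (PySem.List.enumerate s.toList).foldl
        (fun acc p => if p.2 = ',' then acc ++ [p.1] else acc) [] =
      pvQ (PySem.List.enumerate s.toList) := by
  have h := PySem.List.foldl_append_ite (l := PySem.List.enumerate s.toList)
    (acc := ([] : List Int)) (fun q : Int × Char => q.2 = ',') (fun q => q.1)
  simpa [pvQ] using h

-- ===== VERDICT (by name: the statement is the Claim_ definition above) =====
theorem limit_string_spec : Claim_equal_limit_string := by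
  intro s n _
  unfold Spec_limit_string limit_string limit_string_alt
  simp only [pvCommas_eq]
  by_cases hn : n ≤ 0
  · rw [if_pos hn, pvALoop, dif_neg (by omega), String.ofList_toList]
  · rw [if_neg hn]
    set P := pvQ (PySem.List.enumerate s.toList) with hPdef
    rw [pvALoop_spec s.toList P n (by omega),
        pvBLoop_spec n (PySem.List.enumerate s.toList) 0 none (by omega), ← hPdef]
    by_cases hlen : n ≤ 0 + (P.length : Int)
    · rw [if_pos hlen]
      have hPne : P ≠ [] := by
        intro h; rw [h] at hlen; simp at hlen; omega
      rw [if_neg hPne]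
      have hmin : min n.toNat P.length = n.toNat := Nat.min_eq_left (by omega)
      have hidx : (n - 0 - 1).toNat = n.toNat - 1 := by omega
      rw [hmin, hidx]
    · rw [if_neg hlen]
      by_cases hP : P = []
      · rw [if_pos hP, if_pos hP, String.ofList_toList]
      · rw [if_neg hP, if_neg hP]
        have hmin : min n.toNat P.length = P.length := Nat.min_eq_right (by omega)
        rw [hmin]
        have hlast : P.getLast?.getD 0 = P.getD (P.length - 1) 0 := by
          rw [List.getLast?_eq_getElem?, List.getD_eq_getElem?_getD]
        rw [hlast]
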